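-- pv_equiv track=rewrite | github.com/r-azh/TestProject | TestPython/test_encoding/url_encode.py | _prepare_for_url
-- ===== SOURCE A (Python) =====
-- def _prepare_for_url(string):
--     control_characters = [u'\u001F', u'\u007F']
--     space_characters = [u'\u0020']
--     delimiter_characters = ["<", ">", "#", "%", '"']
--     unwise_characters = ["{", "}", "|", "\\", "^", "[", "]", "`"]
--     reserved_characters = [";", "/", "?", ":", "@", "&", "=", "+", "$", ",", "."]
--     for item in control_characters + space_characters + delimiter_characters + unwise_characters \
--                 + reserved_characters:
--         string = string.replace(item, '')
--     return string
-- ===== SOURCE B (Python) =====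
-- def _prepare_for_url(string):
--     unsafe = set('\x1f\x7f <>#%"{}|\\^[]`;/?:@&=+$,.')
--     return ''.join(c for c in string if c not in unsafe)
-- ===== Notes on version B (the rewrite author's own statement) =====
-- stated objective: simpler
-- what changed: A mutates the string through 27 successive whole-string replace passes, one per removal character; B builds one set of the unsafe characters and filters the input characters in a single pass.
import Mathlib
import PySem

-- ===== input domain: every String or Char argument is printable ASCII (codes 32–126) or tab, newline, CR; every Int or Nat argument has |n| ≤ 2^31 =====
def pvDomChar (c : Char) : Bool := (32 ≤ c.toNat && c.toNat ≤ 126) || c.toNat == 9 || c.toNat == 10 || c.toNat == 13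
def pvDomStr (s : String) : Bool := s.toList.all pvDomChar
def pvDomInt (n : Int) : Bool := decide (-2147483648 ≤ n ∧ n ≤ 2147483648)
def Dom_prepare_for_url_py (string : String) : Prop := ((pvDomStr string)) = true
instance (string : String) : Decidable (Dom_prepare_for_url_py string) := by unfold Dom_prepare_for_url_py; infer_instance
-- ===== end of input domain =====

-- B replaces A's 27 successive whole-string replace passes by a single pass filtering each input character against one set of unsafe characters (same result; not claimed faster).

-- ===== PORT A =====
def prepare_for_url_py (string : String) : String :=
  let control_characters : List String := ["\x1F", "\x7F"]
  let space_characters : List String := [" "]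
  let delimiter_characters : List String := ["<", ">", "#", "%", "\""]
  let unwise_characters : List String := ["{", "}", "|", "\\", "^", "[", "]", "`"]
  let reserved_characters : List String := [";", "/", "?", ":", "@", "&", "=", "+", "$", ",", "."]
  (control_characters ++ space_characters ++ delimiter_characters ++ unwise_characters
    ++ reserved_characters).foldl (fun s item => PySem.Str.replace s item "") string

-- ===== PORT B =====
def pvUnsafeSet : PySem.Set Char := PySem.Set.ofList "\x1F\x7F <>#%\"{}|\\^[]`;/?:@&=+$,.".toList

def prepare_for_url_py_alt (string : String) : String :=
  String.ofList (string.toList.filter (fun c => !(PySem.Set.contains pvUnsafeSet c)))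

-- ===== PRECONDITION & SPEC =====
def Spec_prepare_for_url_py (string : String) (out : String) : Prop := out = prepare_for_url_py_alt string
instance (string : String) (out : String) : Decidable (Spec_prepare_for_url_py string out) := by unfold Spec_prepare_for_url_py; infer_instance

-- ===== CLAIM (what is proved, stated in full; the proofs are below) =====
def Claim_equal_prepare_for_url_py : Prop := ∀ (string : String), Dom_prepare_for_url_py string → Spec_prepare_for_url_py string (prepare_for_url_py string)

-- ===== LEMMAS AND PROOFS =====

-- replace of a single character by "" removes exactly that character
lemma replace_go_single (c : Char) (l acc : List Char) (fuel : Nat) (h : l.length ≤ fuel) :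
    PySem.Chars.replace.go [c] [] fuel l acc
      = acc.reverse ++ l.filter (fun d => !(d == c)) := by
  induction l generalizing acc fuel with
  | nil => cases fuel <;> simp [PySem.Chars.replace.go]
  | cons x t ih =>
    cases fuel with
    | zero => simp at h
    | succ n =>
      simp only [List.length_cons, Nat.succ_le_succ_iff] at h
      by_cases hx : x = c
      · subst hx
        simp [PySem.Chars.replace.go, List.isPrefixOf, ih _ _ h]
      · have : ([c].isPrefixOf (x :: t)) = false := by
          simp [List.isPrefixOf]; exact fun e => absurd e.symm hx
        simp [PySem.Chars.replace.go, this, ih _ _ h, hx]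

lemma replace_single (c : Char) (cs : List Char) :
    PySem.Chars.replace cs [c] [] = cs.filter (fun d => !(d == c)) := by
  have := replace_go_single c cs [] cs.length le_rfl
  simpa [PySem.Chars.replace] using this

lemma foldl_replace_filter (items : List Char) (s : List Char) :
    (items.foldl (fun t c => PySem.Chars.replace t [c] []) s)
      = s.filter (fun d => !(items.contains d)) := by
  induction items generalizing s with
  | nil => simp
  | cons c rest ih =>
    rw [List.foldl_cons, replace_single, ih, List.filter_filter]
    apply List.filter_congr
    intro d _
    by_cases hd : d = c <;> simp [hd]

-- ===== VERDICT (by name: the statement is the Claim_ definition above) =====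
theorem prepare_for_url_py_spec : Claim_equal_prepare_for_url_py := by
  intro s _
  unfold Spec_prepare_for_url_py prepare_for_url_py prepare_for_url_py_alt
  have hitems :
      (["\x1F", "\x7F"] ++ [" "] ++ ["<", ">", "#", "%", "\""]
        ++ ["{", "}", "|", "\\", "^", "[", "]", "`"]
        ++ [";", "/", "?", ":", "@", "&", "=", "+", "$", ",", "."] : List String)
        = ("\x1F\x7F <>#%\"{}|\\^[]`;/?:@&=+$,.".toList).map (fun c => String.ofList [c]) := by
    decide
  have hset : pvUnsafeSet = "\x1F\x7F <>#%\"{}|\\^[]`;/?:@&=+$,.".toList := by decide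
  dsimp only
  rw [hitems, List.foldl_map]
  have hfold : ∀ (items : List Char) (t : String),
      items.foldl (fun u c => PySem.Str.replace u (String.ofList [c]) "") t
        = String.ofList (items.foldl (fun l c => PySem.Chars.replace l [c] []) t.toList) := by
    intro items
    induction items with
    | nil => intro t; simp
    | cons c rest ih =>
      intro t
      rw [List.foldl_cons, ih, List.foldl_cons, PySem.Str.toList_replace,
        String.toList_ofList]
      simp
  rw [hfold, foldl_replace_filter, hset]
  congr 1
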